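-- pv_equiv track=rewrite | github.com/sameer7483/LeetCode | 2136-earliest-possible-day-of-full-bloom/2136-earliest-possible-day-of-full-bloom.py | earliestFullBloom
-- ===== SOURCE A (Python) =====
-- from typing import List
--
-- def earliestFullBloom(pt: List[int], gt: List[int]) -> int:
--     zipped = zip(gt, pt)
--     res = 0
--     curr = 0
--     sorted_plant = sorted(zipped)
--     for grow, plant in sorted_plant:
--         res = max(res, grow)+plant
--     return res
-- ===== SOURCE B (Python) =====
-- def earliestFullBloom(pt, gt):
--     days = 0
--     blooms = []
--     for grow, plant in reversed(sorted(zip(gt, pt))):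
--         days += plant
--         blooms.append(days + grow)
--     blooms.append(days)
--     return max(blooms)
-- ===== Notes on version B (the rewrite author's own statement) =====
-- stated objective: idiomatic
-- what changed: B is the textbook greedy decomposition: it traverses the pairs in descending grow order, maintains the cumulative planting total separately, collects each bloom day (plus the planting-finish day) and returns the latest, instead of A's single accumulator folded as res = max(res, grow) + plant over the ascending sort.
import Mathlib
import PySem

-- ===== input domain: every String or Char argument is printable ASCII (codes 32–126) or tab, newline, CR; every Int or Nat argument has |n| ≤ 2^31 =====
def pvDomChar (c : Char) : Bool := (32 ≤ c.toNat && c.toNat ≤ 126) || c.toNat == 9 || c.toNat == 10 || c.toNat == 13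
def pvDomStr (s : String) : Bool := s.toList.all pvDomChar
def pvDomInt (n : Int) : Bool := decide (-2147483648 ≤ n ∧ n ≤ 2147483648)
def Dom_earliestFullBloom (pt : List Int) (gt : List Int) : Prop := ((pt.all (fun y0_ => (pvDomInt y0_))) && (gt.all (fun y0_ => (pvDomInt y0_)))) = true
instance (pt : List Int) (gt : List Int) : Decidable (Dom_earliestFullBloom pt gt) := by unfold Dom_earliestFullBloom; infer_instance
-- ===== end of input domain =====

-- B: textbook greedy decomposition — descending grow order, separate planting total, collect the
-- bloom days and return the latest; same value as A on every input.

-- ===== PORT A =====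
def earliestFullBloom (pt : List Int) (gt : List Int) : Int :=
  let zipped := gt.zip pt
  let sorted_plant := PySem.List.sorted2 zipped Prod.fst Prod.snd
  sorted_plant.foldl (fun res gp => max res gp.1 + gp.2) 0

-- ===== PORT B =====
def earliestFullBloom_alt (pt : List Int) (gt : List Int) : Int :=
  let st := ((PySem.List.sorted2 (gt.zip pt) Prod.fst Prod.snd).reverse).foldl
      (fun (s : Int × List Int) gp => (s.1 + gp.2, s.2 ++ [s.1 + gp.2 + gp.1])) ((0 : Int), ([] : List Int))
  -- max(blooms) after blooms.append(days): the list is nonempty, so Python's max returns; getD 0 never fires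
  (PySem.List.max? (st.2 ++ [st.1]) (fun y => y)).getD 0

-- ===== PRECONDITION & SPEC =====
def Spec_earliestFullBloom (pt : List Int) (gt : List Int) (out : Int) : Prop := out = earliestFullBloom_alt pt gt
instance (pt : List Int) (gt : List Int) (out : Int) : Decidable (Spec_earliestFullBloom pt gt out) := by unfold Spec_earliestFullBloom; infer_instance

-- ===== CLAIM (what is proved, stated in full; the proofs are below) =====
def Claim_equal_earliestFullBloom : Prop := ∀ (pt : List Int) (gt : List Int), Dom_earliestFullBloom pt gt → Spec_earliestFullBloom pt gt (earliestFullBloom pt gt)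

-- ===== LEMMAS AND PROOFS =====

def pvSumP (l : List (Int × Int)) : Int := (l.map Prod.snd).sum

-- bloom days produced by B's loop starting with planting total d
def pvBlooms (d : Int) : List (Int × Int) → List Int
  | [] => []
  | gp :: t => (d + gp.2 + gp.1) :: pvBlooms (d + gp.2) t

-- A's fold over l.reverse, read as a foldr over l
def pvH (m : List (Int × Int)) : Int := m.foldr (fun gp r => max r gp.1 + gp.2) 0

lemma pvSt_char (m : List (Int × Int)) (d0 : Int) (bs0 : List Int) :
    m.foldl (fun (s : Int × List Int) gp => (s.1 + gp.2, s.2 ++ [s.1 + gp.2 + gp.1])) (d0, bs0)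
      = (d0 + pvSumP m, bs0 ++ pvBlooms d0 m) := by
  induction m generalizing d0 bs0 with
  | nil => simp [pvSumP, pvBlooms]
  | cons gp t ih =>
      simp only [List.foldl_cons, ih, pvBlooms, pvSumP, List.map_cons, List.sum_cons]
      refine Prod.ext ?_ ?_
      · simp; ring
      · simp
lemma pvFoldl_max_append (t : List Int) (x d : Int) :
    (t ++ [d]).foldl max x = max x (t.foldr max d) := by
  induction t generalizing x with
  | nil => simp
  | cons y t ih =>
      simp only [List.cons_append, List.foldl_cons, List.foldr_cons, ih]
      omega

lemma pvMax_append (bs : List Int) (d : Int) :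
    PySem.List.max? (bs ++ [d]) (fun y => y) = some (bs.foldr max d) := by
  cases bs with
  | nil => simp [PySem.List.max?_id_cons]
  | cons x t =>
      rw [List.cons_append, PySem.List.max?_id_cons, pvFoldl_max_append]
      simp

lemma pvBlooms_max (m : List (Int × Int)) (d : Int) :
    (pvBlooms d m).foldr max (d + pvSumP m) = d + pvH m := by
  induction m generalizing d with
  | nil => simp [pvBlooms, pvSumP, pvH]
  | cons gp t ih =>
      simp only [pvBlooms, pvH, List.foldr_cons, pvSumP, List.map_cons, List.sum_cons]
      have h := ih (d + gp.2)
      simp only [pvSumP, pvH] at h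
      rw [show d + (gp.2 + (t.map Prod.snd).sum) = d + gp.2 + (t.map Prod.snd).sum by ring, h]
      omega

-- ===== VERDICT (by name: the statement is the Claim_ definition above) =====
theorem earliestFullBloom_spec : Claim_equal_earliestFullBloom := by
  intro pt gt _
  unfold Spec_earliestFullBloom earliestFullBloom earliestFullBloom_alt
  set m := (PySem.List.sorted2 (gt.zip pt) Prod.fst Prod.snd).reverse with hm
  have hs : PySem.List.sorted2 (gt.zip pt) Prod.fst Prod.snd = m.reverse := by
    rw [hm, List.reverse_reverse]
  simp only [hs, List.foldl_reverse, pvSt_char, List.nil_append, pvMax_append, pvBlooms_max,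
    Option.getD_some]
  simp [pvH, zero_add]
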